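-- pv_equiv track=rewrite | github.com/BastienSegura/cyclop-eddy | knowledge-map-gen/render_map.py | compute_positions
-- ===== SOURCE A (Python) =====
-- from collections import defaultdict, deque
--
-- def compute_positions(levels: dict[str, int]) -> tuple[dict[str, tuple[int, int]], int, int]:
--     by_level: dict[int, list[str]] = defaultdict(list)
--     for node, level in levels.items():
--         by_level[level].append(node)
--
--     x_gap = 320
--     y_gap = 90
--     margin = 80
--     positions: dict[str, tuple[int, int]] = {}
--     max_level_size = max((len(nodes) for nodes in by_level.values()), default=1)
--
--     for level, nodes in by_level.items():
--         nodes.sort()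
--         level_height = (len(nodes) - 1) * y_gap
--         start_y = margin + ((max_level_size - 1) * y_gap - level_height) // 2
--         for index, node in enumerate(nodes):
--             positions[node] = (margin + level * x_gap, start_y + index * y_gap)
--
--     width = margin * 2 + max(by_level.keys(), default=0) * x_gap + 220
--     height = margin * 2 + max(1, max_level_size - 1) * y_gap
--     return positions, width, height
-- ===== SOURCE B (Python) =====
-- from collections import Counter
--
--
-- def compute_positions(levels: dict[str, int]) -> tuple[dict[str, tuple[int, int]], int, int]:
--     x_gap = 320
--     y_gap = 90
--     margin = 80
--     level_counts = Counter(levels.values())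
--     max_level_size = max(level_counts.values(), default=1)
--
--     positions: dict[str, tuple[int, int]] = {}
--     for level in dict.fromkeys(levels.values()):
--         x = margin + level * x_gap
--         nodes = sorted(n for n, l in levels.items() if l == level)
--         y = margin + (max_level_size - len(nodes)) * (y_gap // 2)
--         for n in nodes:
--             positions[n] = (x, y)
--             y += y_gap
--
--     width = margin * 2 + max(levels.values(), default=0) * x_gap + 220
--     height = margin * 2 + max(1, max_level_size - 1) * y_gap
--     return positions, width, height
-- ===== Notes on version B (the rewrite author's own statement) =====
-- stated objective: alternative
-- what changed: B drops A's defaultdict-of-lists grouping: it counts level sizes with a Counter, iterates the distinct levels via dict.fromkeys, re-derives each level's nodes by a sorted filter pass over the items, and lays nodes out with a running y accumulator instead of enumerate over a centred start_y.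
import Mathlib
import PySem

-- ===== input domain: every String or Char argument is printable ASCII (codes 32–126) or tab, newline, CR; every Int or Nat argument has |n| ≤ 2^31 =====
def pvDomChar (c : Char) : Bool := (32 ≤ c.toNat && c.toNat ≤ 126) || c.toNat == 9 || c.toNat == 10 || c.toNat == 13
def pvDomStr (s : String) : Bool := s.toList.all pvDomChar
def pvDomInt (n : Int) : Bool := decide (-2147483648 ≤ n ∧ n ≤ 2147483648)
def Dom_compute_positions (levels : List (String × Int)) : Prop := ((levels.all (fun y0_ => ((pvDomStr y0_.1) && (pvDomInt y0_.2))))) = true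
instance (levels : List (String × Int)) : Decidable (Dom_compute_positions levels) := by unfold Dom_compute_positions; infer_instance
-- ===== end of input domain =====

-- B replaces A's defaultdict-of-lists grouping by a Counter of the level values plus one
-- sorted filter pass per distinct level (alternative decomposition, similar cost).

-- ===== PORT A =====
def compute_positions (levels : List (String × Int)) : (List (String × Int × Int)) × Int × Int :=
  let by_level : PySem.Dict Int (List String) :=
    levels.foldl (fun d p => d.modify p.2 [] (fun ns => ns ++ [p.1])) PySem.Dict.empty
  let x_gap : Int := 320
  let y_gap : Int := 90
  let margin : Int := 80
  let max_level_size : Int :=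
    PySem.List.maxD (by_level.values.map (fun nodes => (nodes.length : Int))) (fun x => x) 1
  let positions : PySem.Dict String (Int × Int) :=
    by_level.items.foldl (fun pos lv =>
      let nodes := PySem.List.sorted lv.2 (fun s => s) false
      let level_height : Int := ((nodes.length : Int) - 1) * y_gap
      let start_y : Int := margin + PySem.Int.floordiv ((max_level_size - 1) * y_gap - level_height) 2
      (PySem.List.enumerate nodes).foldl (fun pos iv =>
        pos.insert iv.2 (margin + lv.1 * x_gap, start_y + iv.1 * y_gap)) pos)
      PySem.Dict.empty
  let width : Int := margin * 2 + PySem.List.maxD by_level.keys (fun x => x) 0 * x_gap + 220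
  let height : Int := margin * 2 + max 1 (max_level_size - 1) * y_gap
  (positions.items, width, height)

-- ===== PORT B =====
def compute_positions_alt (levels : List (String × Int)) : (List (String × Int × Int)) × Int × Int :=
  let x_gap : Int := 320
  let y_gap : Int := 90
  let margin : Int := 80
  let level_counts : PySem.Dict Int Int := PySem.Dict.counter (levels.map (fun p => p.2))
  let max_level_size : Int := PySem.List.maxD level_counts.values (fun x => x) 1
  let positions : PySem.Dict String (Int × Int) :=
    (PySem.List.dedup (levels.map (fun p => p.2))).foldl (fun pos level =>
      let x : Int := margin + level * x_gap
      let nodes := PySem.List.sorted ((levels.filter (fun p => p.2 == level)).map (fun p => p.1)) (fun s => s) false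
      (nodes.foldl (fun (st : PySem.Dict String (Int × Int) × Int) n =>
          (st.1.insert n (x, st.2), st.2 + y_gap))
        (pos, margin + (max_level_size - (nodes.length : Int)) * PySem.Int.floordiv y_gap 2)).1)
      PySem.Dict.empty
  let width : Int := margin * 2 + PySem.List.maxD (levels.map (fun p => p.2)) (fun x => x) 0 * x_gap + 220
  let height : Int := margin * 2 + max 1 (max_level_size - 1) * y_gap
  (positions.items, width, height)

-- ===== PRECONDITION & SPEC =====
def Spec_compute_positions (levels : List (String × Int)) (out : (List (String × Int × Int)) × Int × Int) : Prop := out = compute_positions_alt levels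
instance (levels : List (String × Int)) (out : (List (String × Int × Int)) × Int × Int) : Decidable (Spec_compute_positions levels out) := by unfold Spec_compute_positions; infer_instance

-- ===== CLAIM (what is proved, stated in full; the proofs are below) =====
def Claim_equal_compute_positions : Prop := ∀ (levels : List (String × Int)), Dom_compute_positions levels → Spec_compute_positions levels (compute_positions levels)

-- ===== LEMMAS AND PROOFS =====

def pvByLevel (levels : List (String × Int)) : PySem.Dict Int (List String) :=
  levels.foldl (fun d p => d.modify p.2 [] (fun ns => ns ++ [p.1])) PySem.Dict.empty

theorem pvByLevel_keys (levels : List (String × Int)) :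
    (pvByLevel levels).keys = PySem.Set.ofList (levels.map (fun p => p.2)) := by
  unfold pvByLevel
  simpa [PySem.Set.update, PySem.Set.ofList_eq_foldl, PySem.Dict.keys_empty] using
    PySem.Dict.keys_foldl_modify_key levels (fun p => p.2) [] (fun _ p ns => ns ++ [p.1]) PySem.Dict.empty

theorem pvByLevel_keys_nodup (levels : List (String × Int)) : (pvByLevel levels).keys.Nodup := by
  unfold pvByLevel
  exact PySem.Dict.nodup_keys_foldl_modify_key _ _ _ _ _ (by simp [PySem.Dict.keys_empty])

theorem pvByLevel_getD (levels : List (String × Int)) (L : Int) :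
    (pvByLevel levels).getD L [] = (levels.filter (fun p => p.2 == L)).map (fun p => p.1) := by
  unfold pvByLevel
  have h := PySem.Dict.getD_foldl_modify_append (levels.map (fun p => (p.2, p.1))) PySem.Dict.empty L
  rw [List.foldl_map] at h
  simp only [List.filter_map, List.map_map] at h
  simpa [Function.comp_def] using h

theorem pv_maxD_ofList (xs : List Int) (d : Int) :
    PySem.List.maxD (PySem.Set.ofList xs) (fun x => x) d = PySem.List.maxD xs (fun x => x) d := by
  unfold PySem.List.maxD
  cases h1 : PySem.List.max? (PySem.Set.ofList xs) (fun x => x) with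
  | none =>
    rw [PySem.List.max?_eq_none_iff] at h1
    have hx : xs = [] := by
      cases xs with
      | nil => rfl
      | cons a t =>
        exfalso
        have : a ∈ PySem.Set.ofList (a :: t) := (PySem.Set.mem_ofList _ _).mpr (by simp)
        rw [h1] at this; simp at this
    subst hx; rfl
  | some m1 =>
    cases h2 : PySem.List.max? xs (fun x => x) with
    | none =>
      rw [PySem.List.max?_eq_none_iff] at h2
      subst h2
      simp [PySem.Set.ofList] at h1
      simp [PySem.List.max?] at h1
    | some m2 =>
      have e1 : m1 ∈ xs := (PySem.Set.mem_ofList _ _).mp (PySem.List.max?_mem h1)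
      have e2 : m2 ∈ PySem.Set.ofList xs := (PySem.Set.mem_ofList _ _).mpr (PySem.List.max?_mem h2)
      have le1 : m1 ≤ m2 := PySem.List.max?_isMax h2 m1 e1
      have le2 : m2 ≤ m1 := PySem.List.max?_isMax h1 m2 e2
      simp [le_antisymm le1 le2]

theorem pv_fold_enum (x : Int) (nodes : List String) (s : Int)
    (pos : PySem.Dict String (Int × Int)) (y0 : Int) :
    (nodes.foldl (fun (st : PySem.Dict String (Int × Int) × Int) n =>
        (st.1.insert n (x, st.2), st.2 + 90)) (pos, y0)).1
      = (PySem.List.enumerate nodes s).foldl (fun pos iv =>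
          pos.insert iv.2 (x, y0 + (iv.1 - s) * 90)) pos := by
  induction nodes generalizing s pos y0 with
  | nil => simp [PySem.List.enumerate_nil]
  | cons n t ih =>
    rw [PySem.List.enumerate_cons]
    simp only [List.foldl_cons]
    have e : y0 + (s - s) * 90 = y0 := by ring
    rw [e, ih (s + 1)]
    have hf : (fun (pos : PySem.Dict String (Int × Int)) (iv : Int × String) =>
        pos.insert iv.2 (x, y0 + 90 + (iv.1 - (s + 1)) * 90))
        = (fun pos iv => pos.insert iv.2 (x, y0 + (iv.1 - s) * 90)) := by
      funext pos iv; congr 2; ring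
    rw [hf]

theorem pv_values_len (levels : List (String × Int)) :
    (pvByLevel levels).values.map (fun ns => ((ns.length : Nat) : Int))
      = (PySem.Dict.counter (levels.map (fun p => p.2))).values := by
  have h1 : (pvByLevel levels).values = (pvByLevel levels).items.map (fun p => p.2) := rfl
  have h2 : (PySem.Dict.counter (levels.map (fun p => p.2))).values
      = ((PySem.Dict.counter (levels.map (fun p => p.2))).items).map (fun p => p.2) := rfl
  rw [h1, h2, PySem.Dict.items_eq_map_keys (pvByLevel levels) (pvByLevel_keys_nodup levels) [],
    pvByLevel_keys, PySem.Dict.items_counter]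
  simp only [List.map_map]
  apply List.map_congr_left
  intro k hk
  simp [pvByLevel_getD, List.count, List.countP_map, Function.comp_def, Function.comp_def]
  simp [List.countP_eq_length_filter]

theorem compute_positions_spec : Claim_equal_compute_positions := by
  unfold Claim_equal_compute_positions Spec_compute_positions
  intro levels _
  unfold compute_positions compute_positions_alt
  simp only []
  rw [show (levels.foldl (fun d p => d.modify p.2 [] fun ns => ns ++ [p.1]) PySem.Dict.empty)
      = pvByLevel levels from rfl]
  rw [show PySem.List.dedup (levels.map (fun p => p.2))
      = PySem.Set.ofList (levels.map (fun p => p.2)) from rfl]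
  rw [pv_values_len levels]
  rw [pvByLevel_keys levels, pv_maxD_ofList]
  rw [PySem.Dict.items_eq_map_keys (pvByLevel levels) (pvByLevel_keys_nodup levels) [],
    pvByLevel_keys levels, List.foldl_map]
  congr 2
  apply PySem.List.foldl_congr_mem
  intro acc L hL
  simp only []
  rw [pvByLevel_getD levels L]
  generalize (PySem.List.maxD (PySem.Dict.counter (List.map (fun p => p.2) levels)).values (fun x => x) 1) = M
  generalize (PySem.List.sorted (List.map (fun p => p.1) (List.filter (fun p => p.2 == L) levels)) (fun s => s)) = nodes
  rw [pv_fold_enum (80 + L * 320) nodes 0 acc (80 + (M - (nodes.length : Int)) * PySem.Int.floordiv 90 2)]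
  have hf : (fun (pos : PySem.Dict String (Int × Int)) (iv : Int × String) =>
        pos.insert iv.2 (80 + L * 320,
          80 + PySem.Int.floordiv ((M - 1) * 90 - ((nodes.length : Int) - 1) * 90) 2 + iv.1 * 90))
      = (fun pos iv => pos.insert iv.2 (80 + L * 320,
          80 + (M - (nodes.length : Int)) * PySem.Int.floordiv 90 2 + (iv.1 - 0) * 90)) := by
    funext pos iv
    congr 2
    rw [show PySem.Int.floordiv 90 2 = 45 from by decide,
      PySem.Int.floordiv_eq_ediv_of_pos (by norm_num : (0 : Int) < 2)]
    omega
  rw [hf]
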